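-- pv_equiv track=rewrite | github.com/sealinglip/leecode | 2216.美化数组的最少删除数.py | minDeletion
-- ===== SOURCE A (Python) =====
-- from typing import List
--
-- def minDeletion(nums: List[int]) -> int:
--     n = len(nums)
--     # 下面的解法会TLE
--     # if n < 2:
--     #     return n
--     # # 从后往前遍历，每个元素或删或留
--     # # 记dp(i)为nums[i:]保留nums[i]，要变成美丽数组需要删除的最少元素个数
--     # # 状态转移方程为：
--     # # dp(n) = 0, dp(n-1) = ∞
--     # # dp(i) = min(dp(j) + (j-i-2) if nums[k] != nums[i])  i < k < j <= n
--     # # or dp(i) = ∞ 如果找不到符合条件的i，k，j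
--     # dp = [inf] * (n+1)
--     # dp[-1] = 0
--     # for i in range(n-2, -1, -1):
--     #     mi = dp[i]
--     #     hasK = False # 有没有找到符合条件的k
--     #     for j in range(i+2, n+1):
--     #         if not hasK and nums[i] != nums[j-1]:
--     #             hasK = True
--     #         if hasK:
--     #             mi = min(mi, dp[j] + (j - i - 2))
--     #     dp[i] = mi
--
--     # return min(dp[i] + i for i in range(n))
--
--     cnt = 0
--     even = True
--     for i in range(n-1):
--         if even and nums[i] == nums[i+1]:
--             cnt += 1
--         else:
--             even = not even
--
--     if (n - cnt) % 2 != 0: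
--         cnt += 1
--
--     return cnt
-- ===== SOURCE B (Python) =====
-- from typing import List
--
-- def minDeletion(nums: List[int]) -> int:
--     # stage 1: run-length encode the array
--     runs = []
--     cur = None
--     length = 0
--     for x in nums:
--         if cur is not None and x == cur:
--             length += 1
--         else:
--             if cur is not None:
--                 runs.append((cur, length))
--             cur = x
--             length = 1
--     if cur is not None:
--         runs.append((cur, length))
--     # stage 2: closed-form deletions per run, tracking parity of kept count
--     cnt = 0
--     odd = False
--     for _, L in runs:
--         if not odd:
--             cnt += L - 1
--             odd = True
--         elif L == 1:
--             odd = False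
--         else:
--             cnt += L - 2
--     if odd:
--         cnt += 1
--     return cnt
-- ===== Notes on version B (the rewrite author's own statement) =====
-- stated objective: alternative
-- what changed: A makes a single index-based scan toggling a parity boolean over adjacent pairs nums[i]/nums[i+1]; B is a two-stage algorithm: it first run-length encodes the array into (value,length) runs, then folds over the runs adding a closed-form number of deletions per run (L-1 or L-2) depending on the kept-count parity at the run boundary.
import Mathlib
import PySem

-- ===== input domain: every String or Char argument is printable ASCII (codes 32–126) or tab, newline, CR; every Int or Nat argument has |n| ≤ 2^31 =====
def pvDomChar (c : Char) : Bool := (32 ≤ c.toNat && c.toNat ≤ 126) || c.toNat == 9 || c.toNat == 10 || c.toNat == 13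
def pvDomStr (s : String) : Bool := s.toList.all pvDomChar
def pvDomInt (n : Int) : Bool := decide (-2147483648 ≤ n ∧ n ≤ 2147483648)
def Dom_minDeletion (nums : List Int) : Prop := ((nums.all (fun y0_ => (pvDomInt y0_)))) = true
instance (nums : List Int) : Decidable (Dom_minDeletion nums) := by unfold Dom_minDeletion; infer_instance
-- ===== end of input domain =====

-- B replaces A's single index-based neighbour scan with a two-stage algorithm:
-- run-length encode, then per-run closed-form deletion counts; objective: alternative.

-- ===== PORT A =====
-- A's loop body: 'if even and nums[i] == nums[i+1]: cnt += 1 else: even = not even'.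
-- nums[i]/nums[i+1] are ported with pyGetD (default 0): every index A uses is in range
-- (i ∈ range(n-1)), so the default is never read and the port is exact.
def stepA (nums : List Int) (s : Int × Bool) (i : Int) : Int × Bool :=
  if s.2 && (PySem.List.pyGetD nums i 0 == PySem.List.pyGetD nums (i + 1) 0)
  then (s.1 + 1, s.2) else (s.1, !s.2)

def minDeletion (nums : List Int) : Int :=
  let n : Int := (nums.length : Int)
  let s : Int × Bool := (PySem.List.pyRange 0 (n - 1) 1).foldl (stepA nums) (0, true)
  if PySem.Int.mod (n - s.1) 2 ≠ 0 then s.1 + 1 else s.1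

-- ===== PORT B =====
-- stage-1 loop body of Source B: state (runs, cur, length)
def stepRle (s : List (Int × Int) × Option Int × Int) (x : Int) :
    List (Int × Int) × Option Int × Int :=
  match s.2.1 with
  | some c => if x == c then (s.1, some c, s.2.2 + 1)
              else (s.1 ++ [(c, s.2.2)], some x, 1)
  | none => (s.1, some x, 1)

-- stage-2 loop body of Source B: state (cnt, odd), run (value, L)
def stepRun (s : Int × Bool) (r : Int × Int) : Int × Bool :=
  if !s.2 then (s.1 + r.2 - 1, true)
  else if r.2 == 1 then (s.1, false)
  else (s.1 + r.2 - 2, s.2)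

def minDeletion_alt (nums : List Int) : Int :=
  let st := nums.foldl stepRle ([], none, 0)
  let runs := match st.2.1 with
    | some c => st.1 ++ [(c, st.2.2)]
    | none => st.1
  let s := runs.foldl stepRun (0, false)
  if s.2 then s.1 + 1 else s.1

-- ===== PRECONDITION & SPEC =====
def Spec_minDeletion (nums : List Int) (out : Int) : Prop := out = minDeletion_alt nums
instance (nums : List Int) (out : Int) : Decidable (Spec_minDeletion nums out) := by unfold Spec_minDeletion; infer_instance

-- ===== CLAIM (what is proved, stated in full; the proofs are below) =====
def Claim_equal_minDeletion : Prop := ∀ (nums : List Int), Dom_minDeletion nums → Spec_minDeletion nums (minDeletion nums)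

-- ===== LEMMAS AND PROOFS =====

-- A's loop rewritten as structural recursion on the list (proof helper only)
def aLoop (cnt : Int) (even : Bool) : List Int → Int × Bool
  | a :: b :: t =>
      if even && (a == b) then aLoop (cnt + 1) even (b :: t)
      else aLoop cnt (!even) (b :: t)
  | _ => (cnt, even)

lemma stepA_shift (x : Int) (xs : List Int) (m : Nat) (s : Int × Bool) :
    stepA (x :: xs) s ((m : Int) + 1) = stepA xs s (m : Int) := by
  have h2 : ((m : Int) + 1 + 1) = ((m + 2 : Nat) : Int) := by push_cast; ring
  have h1 : ((m : Int) + 1) = ((m + 1 : Nat) : Int) := by push_cast; ring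
  rw [stepA, stepA, h2, h1, PySem.List.pyGetD_natCast, PySem.List.pyGetD_natCast,
      PySem.List.pyGetD_natCast, PySem.List.pyGetD_natCast]
  simp only [List.getD_cons_succ]

lemma foldl_stepA_shift (x : Int) (xs : List Int) (m : Nat) (s : Int × Bool) :
    (PySem.List.pyRange 1 ((m : Int) + 1) 1).foldl (stepA (x :: xs)) s
      = (PySem.List.pyRange 0 (m : Int) 1).foldl (stepA xs) s := by
  induction m generalizing s with
  | zero =>
      rw [show ((0 : Nat) : Int) + 1 = 1 by norm_num,
          PySem.List.pyRange_one_eq_nil le_rfl,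
          show ((0 : Nat) : Int) = 0 by norm_num,
          PySem.List.pyRange_one_eq_nil le_rfl]
      rfl
  | succ k ih =>
      have e1 : PySem.List.pyRange 1 (((k + 1 : Nat) : Int) + 1) 1
          = PySem.List.pyRange 1 ((k : Int) + 1) 1 ++ [(k : Int) + 1] := by
        rw [show (((k + 1 : Nat) : Int) + 1) = ((k : Int) + 1) + 1 by push_cast; ring]
        exact PySem.List.pyRange_one_succ_right (by omega)
      have e2 : PySem.List.pyRange 0 ((k + 1 : Nat) : Int) 1
          = PySem.List.pyRange 0 (k : Int) 1 ++ [(k : Int)] := by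
        rw [show ((k + 1 : Nat) : Int) = (k : Int) + 1 by push_cast; ring]
        exact PySem.List.pyRange_one_succ_right (by omega)
      rw [e1, e2, List.foldl_append, List.foldl_append, ih]
      simp only [List.foldl_cons, List.foldl_nil]
      exact stepA_shift x xs k _

-- A's pyRange fold equals aLoop
lemma A_fold_eq_aLoop (nums : List Int) (s : Int × Bool) :
    (PySem.List.pyRange 0 ((nums.length : Int) - 1) 1).foldl (stepA nums) s
      = aLoop s.1 s.2 nums := by
  induction nums generalizing s with
  | nil => rw [PySem.List.pyRange_one_eq_nil (by norm_num)]; simp [aLoop]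
  | cons a t ih =>
      cases t with
      | nil =>
          rw [show ((([a] : List Int).length : Int) - 1) = 0 by norm_num,
              PySem.List.pyRange_one_eq_nil le_rfl]
          simp [aLoop]
      | cons b t' =>
          have hn : (((a :: b :: t').length : Int) - 1) = ((t'.length : Nat) : Int) + 1 := by
            push_cast [List.length_cons]; ring
          have hm : (((b :: t').length : Int) - 1) = ((t'.length : Nat) : Int) := by
            push_cast [List.length_cons]; ring
          rw [hn, PySem.List.pyRange_one_cons (by omega), List.foldl_cons,
              show (0 : Int) + 1 = 1 by norm_num, foldl_stepA_shift, ← hm, ih]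
          have hstep : stepA (a :: b :: t') s 0
              = if s.2 && (a == b) then (s.1 + 1, s.2) else (s.1, !s.2) := by
            simp [stepA, PySem.List.pyGetD]
          rw [hstep]
          by_cases h : s.2 && (a == b) <;> simp [aLoop, h]

-- B's stage 1 rewritten structurally: the run-length encoding of c^len ++ l
def rleFront (c len : Int) : List Int → List (Int × Int)
  | [] => [(c, len)]
  | x :: t => if x = c then rleFront c (len + 1) t else (c, len) :: rleFront x 1 t

lemma rle_aux (l : List Int) : ∀ (runs : List (Int × Int)) (c len : Int),
    (match (l.foldl stepRle (runs, some c, len)).2.1 with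
      | some c' => (l.foldl stepRle (runs, some c, len)).1
          ++ [(c', (l.foldl stepRle (runs, some c, len)).2.2)]
      | none => (l.foldl stepRle (runs, some c, len)).1)
      = runs ++ rleFront c len l := by
  induction l with
  | nil => intro runs c len; simp [rleFront]
  | cons x t ih =>
      intro runs c len
      by_cases hx : x = c
      · have hs : stepRle (runs, some c, len) x = (runs, some c, len + 1) := by
          simp [stepRle, hx]
        rw [List.foldl_cons, hs, ih, rleFront, if_pos hx]
      · have hs : stepRle (runs, some c, len) x = (runs ++ [(c, len)], some x, 1) := by
          simp [stepRle, hx]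
        rw [List.foldl_cons, hs, ih, rleFront, if_neg hx, List.append_assoc]
        rfl

-- A's deletions and parity flag accumulated by a partially consumed run of length kL+1
def dA (odd0 : Bool) (kL : Nat) : Int :=
  if odd0 then (if kL = 0 then 0 else (kL : Int) - 1) else (kL : Int)
def eMid (odd0 : Bool) (kL : Nat) : Bool := if odd0 && (kL == 0) then false else true

-- main invariant: B's run fold over rleFront c (kL+1) l matches A's aLoop from mid-run state,
-- and B's odd flag is the parity of the number of kept elements
lemma runs_rel (l : List Int) : ∀ (c cnt : Int) (kL : Nat) (odd0 : Bool),
    ((rleFront c ((kL : Int) + 1) l).foldl stepRun (cnt, odd0)).1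
      = (aLoop (cnt + dA odd0 kL) (eMid odd0 kL) (c :: l)).1
    ∧ (((rleFront c ((kL : Int) + 1) l).foldl stepRun (cnt, odd0)).2 = true ↔
        ((if odd0 then (1 : Int) else 0) + (kL : Int) + 1 + (l.length : Int)
          - (((rleFront c ((kL : Int) + 1) l).foldl stepRun (cnt, odd0)).1 - cnt)) % 2 = 1) := by
  induction l with
  | nil =>
      intro c cnt kL odd0
      have hfold : (rleFront c ((kL : Int) + 1) []).foldl stepRun (cnt, odd0)
          = stepRun (cnt, odd0) (c, (kL : Int) + 1) := by simp [rleFront]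
      cases odd0 with
      | false =>
          have hs : stepRun (cnt, false) (c, (kL : Int) + 1) = (cnt + (kL : Int), true) := by
            simp [stepRun] ; omega
          rw [hfold, hs]
          refine ⟨?_, ?_⟩
          · simp [aLoop, dA, eMid]
          · simp
      | true =>
          cases kL with
          | zero =>
              have hs : stepRun (cnt, true) (c, ((0 : Nat) : Int) + 1) = (cnt, false) := by
                simp [stepRun]
              rw [hfold, hs]
              refine ⟨?_, ?_⟩
              · simp [aLoop, dA, eMid]
              · simp
          | succ k =>
              have hs : stepRun (cnt, true) (c, ((k + 1 : Nat) : Int) + 1)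
                  = (cnt + (k : Int), true) := by
                simp [stepRun]
                split_ifs with h
                · exact absurd h (by omega)
                · simp ; omega
              rw [hfold, hs]
              refine ⟨?_, ?_⟩
              · simp [aLoop, dA, eMid]
              · simp ; omega
  | cons x t ih =>
      intro c cnt kL odd0
      by_cases hx : x = c
      · -- run continues
        have hr : rleFront c ((kL : Int) + 1) (x :: t)
            = rleFront c (((kL + 1 : Nat) : Int) + 1) t := by
          rw [rleFront, if_pos hx]; push_cast; ring_nf
        obtain ⟨ih1, ih2⟩ := ih c cnt (kL + 1) odd0
        have hA : (aLoop (cnt + dA odd0 (kL + 1)) (eMid odd0 (kL + 1)) (c :: t)).1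
            = (aLoop (cnt + dA odd0 kL) (eMid odd0 kL) (c :: x :: t)).1 := by
          subst hx
          cases odd0 with
          | false =>
              have h1 : aLoop (cnt + dA false kL) (eMid false kL) (x :: x :: t)
                  = aLoop (cnt + dA false kL + 1) true (x :: t) := by
                simp [aLoop, eMid]
              rw [h1]
              have h2 : cnt + dA false (kL + 1) = cnt + dA false kL + 1 := by
                simp [dA] ; ring
              rw [h2]; simp [eMid]
          | true =>
              cases kL with
              | zero =>
                  have h1 : aLoop (cnt + dA true 0) (eMid true 0) (x :: x :: t)
                      = aLoop (cnt + dA true 0) true (x :: t) := by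
                    simp [aLoop, eMid]
                  rw [h1]
                  simp [dA, eMid]
              | succ k =>
                  have h1 : aLoop (cnt + dA true (k + 1)) (eMid true (k + 1)) (x :: x :: t)
                      = aLoop (cnt + dA true (k + 1) + 1) true (x :: t) := by
                    simp [aLoop, eMid]
                  rw [h1]
                  have h2 : cnt + dA true (k + 1 + 1) = cnt + dA true (k + 1) + 1 := by
                    simp [dA] ; ring
                  rw [h2]; simp [eMid]
        refine ⟨by rw [hr, ih1, hA], ?_⟩
        rw [hr, ih2]
        constructor <;> intro h <;>
          (simp only [List.length_cons] at h ⊢; push_cast at h ⊢; omega)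
      · -- run boundary
        have hbeq : ((c == x) : Bool) = false := by
          simp only [beq_eq_false_iff_ne]; exact fun h => hx h.symm
        have hr : rleFront c ((kL : Int) + 1) (x :: t)
            = (c, (kL : Int) + 1) :: rleFront x ((0 : Nat) + 1) t := by
          rw [rleFront, if_neg hx]; norm_num
        by_cases ho : odd0 = false
        · -- even parity at run boundary: cnt += L-1, odd := true
          have hs : stepRun (cnt, odd0) (c, (kL : Int) + 1) = (cnt + (kL : Int), true) := by
            subst ho; simp [stepRun] ; omega
          obtain ⟨ih1, ih2⟩ := ih x (cnt + (kL : Int)) 0 true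
          have hA : (aLoop (cnt + dA odd0 kL) (eMid odd0 kL) (c :: x :: t)).1
              = (aLoop (cnt + (kL : Int) + dA true 0) (eMid true 0) (x :: t)).1 := by
            subst ho
            simp [aLoop, hbeq, dA, eMid]
          refine ⟨?_, ?_⟩
          · rw [hr, List.foldl_cons, hs, ih1, hA]
          · rw [hr, List.foldl_cons, hs, ih2]
            subst ho
            constructor <;> intro h <;>
              (simp only [List.length_cons] at h ⊢; simp at h ⊢; omega)
        · have ho' : odd0 = true := by revert ho; cases odd0 <;> simp
          by_cases hk : kL = 0
          · -- odd parity, run length 1: pair completed, odd := false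
            subst hk
            have hs : stepRun (cnt, odd0) (c, ((0 : Nat) : Int) + 1) = (cnt, false) := by
              subst ho'; simp [stepRun]
            obtain ⟨ih1, ih2⟩ := ih x cnt 0 false
            have hA : (aLoop (cnt + dA odd0 0) (eMid odd0 0) (c :: x :: t)).1
                = (aLoop (cnt + dA false 0) (eMid false 0) (x :: t)).1 := by
              subst ho'
              simp [aLoop, dA, eMid]
            refine ⟨?_, ?_⟩
            · rw [hr, List.foldl_cons, hs, ih1, hA]
            · rw [hr, List.foldl_cons, hs, ih2]
              subst ho'
              constructor <;> intro h <;>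
                (simp only [List.length_cons] at h ⊢; simp at h ⊢; omega)
          · -- odd parity, run length ≥ 2: cnt += L-2, odd stays true
            obtain ⟨k, rfl⟩ : ∃ k, kL = k + 1 := ⟨kL - 1, by omega⟩
            have hs : stepRun (cnt, odd0) (c, ((k + 1 : Nat) : Int) + 1)
                = (cnt + (k : Int), true) := by
              subst ho'
              simp [stepRun]
              split_ifs with h
              · exact absurd h (by omega)
              · simp ; omega
            obtain ⟨ih1, ih2⟩ := ih x (cnt + (k : Int)) 0 true
            have hA : (aLoop (cnt + dA odd0 (k + 1)) (eMid odd0 (k + 1)) (c :: x :: t)).1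
                = (aLoop (cnt + (k : Int) + dA true 0) (eMid true 0) (x :: t)).1 := by
              subst ho'
              have harg : cnt + dA true (k + 1) = cnt + (k : Int) + dA true 0 := by
                simp [dA]
              rw [harg]
              simp [aLoop, hbeq, eMid]
            refine ⟨?_, ?_⟩
            · rw [hr, List.foldl_cons, hs, ih1, hA]
            · rw [hr, List.foldl_cons, hs, ih2]
              subst ho'
              constructor <;> intro h <;>
                (simp only [List.length_cons] at h ⊢; simp at h ⊢; omega)

-- ===== VERDICT (by name: the statement is the Claim_ definition above) =====
theorem minDeletion_spec : Claim_equal_minDeletion := by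
  intro nums _
  unfold Spec_minDeletion
  cases nums with
  | nil => decide
  | cons a t =>
      have h1 : stepRle (([] : List (Int × Int)), none, 0) a = ([], some a, 1) := by
        simp [stepRle]
      have hruns :
          (match ((a :: t).foldl stepRle ([], none, 0)).2.1 with
            | some c' => ((a :: t).foldl stepRle ([], none, 0)).1
                ++ [(c', ((a :: t).foldl stepRle ([], none, 0)).2.2)]
            | none => ((a :: t).foldl stepRle ([], none, 0)).1)
            = rleFront a 1 t := by
        rw [List.foldl_cons, h1]
        have := rle_aux t [] a 1
        simpa using this
      obtain ⟨hc, hp⟩ := runs_rel t a 0 0 false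
      have hone : ((0 : Nat) : Int) + 1 = (1 : Int) := by norm_num
      rw [hone] at hc hp
      have hA0 : (aLoop (0 + dA false 0) (eMid false 0) (a :: t)).1
          = (aLoop 0 true (a :: t)).1 := by simp [dA, eMid]
      rw [hA0] at hc
      show minDeletion (a :: t) = minDeletion_alt (a :: t)
      simp only [minDeletion, minDeletion_alt]
      rw [A_fold_eq_aLoop (a :: t) (0, true)]
      rw [hruns]
      set r := (rleFront a 1 t).foldl stepRun (0, false) with hr
      have hmod : PySem.Int.mod (((a :: t).length : Int) - (aLoop 0 true (a :: t)).1) 2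
          = (((a :: t).length : Int) - (aLoop 0 true (a :: t)).1) % 2 :=
        PySem.Int.mod_eq_emod_of_pos (by norm_num)
      simp only [hmod]
      by_cases hb : r.2 = true
      · have h1' := (hp.mp hb)
        rw [if_pos hb, if_pos]
        · rw [hc]
        · rw [hc] at h1'
          simp only [List.length_cons]
          push_cast at h1' ⊢
          omega
      · have hb' : r.2 = false := by revert hb; cases r.2 <;> simp
        have h1' : ¬ ((if false = true then (1 : Int) else 0) + ((0 : Nat) : Int) + 1
            + (t.length : Int) - (r.1 - 0)) % 2 = 1 := by
          intro h; exact hb (hp.mpr h)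
        have h2 : ((((a :: t).length : Int) - (aLoop 0 true (a :: t)).1) % 2 = 0) := by
          rw [hc] at h1'
          simp at h1'
          simp only [List.length_cons]
          push_cast
          omega
        rw [hb']
        rw [if_neg (not_not_intro h2)]
        rw [if_neg (show ¬(false = true) by simp)]
        exact hc.symm
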